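-- pv_equiv track=rewrite | github.com/FAdy-200/problem_solving | ATL/exam/Q2.py | subroutine
-- ===== SOURCE A (Python) =====
-- sol = {}
--
-- def subroutine(A, Y):
--     if sol.get((tuple(A), Y)) is not None:
--         return sol[(tuple(A), Y)]
--     if len(A) == 1:
--         sol[(tuple(A), Y)] = 0
--         return 0
--     if abs(A[0] - A[1]) == Y:
--         z = max(subroutine(A[1:], Y) + 1, subroutine([A[0]] + A[2:], Y))
--         sol[(tuple(A), Y)] = z
--         return z
--     else:
--         f = max(subroutine(A[1:], Y), subroutine([A[0]] + A[2:], Y))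
--         sol[(tuple(A), Y)] = f
--         return f
-- ===== SOURCE B (Python) =====
-- def subroutine(A, Y):
--     # Bottom-up over suffixes: allvals(leads, S) = [best score of [x]+S for x in leads].
--     def allvals(leads, S):
--         if not S:
--             return [0] * len(leads)
--         h = S[0]
--         v = allvals(leads + [h], S[1:])
--         gh = v[-1]
--         return [max(gh + (1 if abs(x - h) == Y else 0), w) for x, w in zip(leads, v)]
--     return allvals([A[0]], A[1:])[0]
-- ===== Notes on version B (the rewrite author's own statement) =====
-- stated objective: faster
-- what changed: Replaces A's branching recursion memoized by a global dict keyed on whole tuples (with list slicing/concatenation per call) by one bottom-up recursion over suffixes that carries the entire vector of values for all candidate leading elements.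
import Mathlib
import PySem

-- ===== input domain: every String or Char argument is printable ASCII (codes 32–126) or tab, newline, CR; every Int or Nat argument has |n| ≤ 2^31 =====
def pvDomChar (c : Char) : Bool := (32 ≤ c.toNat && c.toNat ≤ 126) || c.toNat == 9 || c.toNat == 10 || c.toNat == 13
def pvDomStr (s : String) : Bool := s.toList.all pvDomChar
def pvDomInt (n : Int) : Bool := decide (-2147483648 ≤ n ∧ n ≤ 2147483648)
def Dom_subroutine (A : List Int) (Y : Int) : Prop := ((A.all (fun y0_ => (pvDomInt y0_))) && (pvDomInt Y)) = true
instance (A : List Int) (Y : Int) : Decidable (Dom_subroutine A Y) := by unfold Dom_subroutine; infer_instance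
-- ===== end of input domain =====

-- B replaces A's exponential branching recursion with a pure memo cache (tuple keys, list slicing)
-- by one bottom-up pass over suffixes carrying the whole value vector; return values agree, B is O(n^2).
-- A's module-level memo dict `sol` is a pure cache (it never changes a return value) and a hidden
-- global side effect; the ports and the claim are about the return value only.

-- ===== PORT A =====
-- literal transliteration of A's recursion (the memo dict only caches already-computed values,
-- so it is dropped; A[1:] and [A[0]] + A[2:] become the corresponding cons/tail forms)
def subroutine (A : List Int) (Y : Int) : Int :=
  match A with
  | [] => 0          -- Python raises IndexError here; excluded by Pre_subroutine
  | [_] => 0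
  | a :: b :: t =>
    if |a - b| = Y then
      max (subroutine (b :: t) Y + 1) (subroutine (a :: t) Y)
    else
      max (subroutine (b :: t) Y) (subroutine (a :: t) Y)
termination_by A.length
decreasing_by all_goals simp

-- ===== PORT B =====
-- allvals leads S = [best score of [x]+S for x in leads]; recursion on the suffix S
def allvals (Y : Int) (leads S : List Int) : List Int :=
  match S with
  | [] => List.replicate leads.length 0
  | h :: rest =>
    let v := allvals Y (leads ++ [h]) rest
    let gh := (PySem.List.pyGet? v (-1)).getD 0   -- v[-1]; v is never empty (leads ≠ [])
    (leads.zip v).map (fun p => max (gh + (if |p.1 - h| = Y then 1 else 0)) p.2)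

def subroutine_alt (A : List Int) (Y : Int) : Int :=
  match A with
  | [] => 0          -- Python raises IndexError here; excluded by Pre_subroutine
  | a :: t => (PySem.List.pyGet? (allvals Y [a] t) 0).getD 0

-- ===== PRECONDITION & SPEC =====
-- Pre_ excludes only the empty list, on which both Pythons raise IndexError (A[0]).
def Pre_subroutine (A : List Int) (Y : Int) : Prop := A ≠ []
instance (A : List Int) (Y : Int) : Decidable (Pre_subroutine A Y) := by unfold Pre_subroutine; infer_instance
def pvWitness_subroutine : List Int × Int := ([3, 5, 2, 5], 2)
def Spec_subroutine (A : List Int) (Y : Int) (out : Int) : Prop := out = subroutine_alt A Y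
instance (A : List Int) (Y : Int) (out : Int) : Decidable (Spec_subroutine A Y out) := by unfold Spec_subroutine; infer_instance

-- ===== CLAIM (what is proved, stated in full; the proofs are below) =====
def Claim_equal_subroutine : Prop := ∀ (A : List Int) (Y : Int), Dom_subroutine A Y → Pre_subroutine A Y → Spec_subroutine A Y (subroutine A Y)

-- ===== LEMMAS AND PROOFS =====

-- value of the problem for the list lead :: t, as a reference recursion
def G (Y lead : Int) (t : List Int) : Int :=
  match t with
  | [] => 0
  | h :: rest => max (G Y h rest + (if |lead - h| = Y then 1 else 0)) (G Y lead rest)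

theorem subroutine_eq_G (Y : Int) (t : List Int) : ∀ a, subroutine (a :: t) Y = G Y a t := by
  induction t with
  | nil => intro a; simp [subroutine, G]
  | cons h rest ih =>
    intro a
    rw [subroutine]
    by_cases hc : |a - h| = Y <;> simp [G, hc, ih]

theorem zipmap_aux (f : Int → Int) (g : Int × Int → Int) :
    ∀ (leads tail : List Int),
      ((leads.zip (leads.map f ++ tail)).map g) = leads.map (fun x => g (x, f x)) := by
  intro leads
  induction leads with
  | nil => intro tail; simp
  | cons a l ih => intro tail; simp [ih]

theorem allvals_eq (Y : Int) (S : List Int) :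
    ∀ leads, allvals Y leads S = leads.map (fun x => G Y x S) := by
  induction S with
  | nil => intro leads; simp [allvals, G]
  | cons h rest ih =>
    intro leads
    rw [allvals]
    simp only [ih (leads ++ [h]), List.map_append, List.map_cons, List.map_nil]
    rw [PySem.List.pyGet?_neg_one_append_singleton]
    rw [zipmap_aux]
    simp [G]

-- ===== VERDICT (by name: the statement is the Claim_ definition above) =====
theorem subroutine_spec : Claim_equal_subroutine := by
  intro A Y _ hpre
  unfold Spec_subroutine
  match A with
  | [] => exact absurd rfl hpre
  | a :: t =>
    rw [subroutine_eq_G, subroutine_alt, allvals_eq]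
    simp
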